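-- pv_equiv track=rewrite | github.com/MaplumeX/Weaver | agent/runtime/deep/roles/supervisor.py | _parse_decision
-- ===== SOURCE A (Python) =====
-- from enum import Enum
--
-- class SupervisorAction(str, Enum):
--     PLAN = "plan"
--     DISPATCH = "dispatch"
--     REPLAN = "replan"
--     RETRY_BRANCH = "retry_branch"
--     PATCH_BRANCH = "patch_branch"
--     SPAWN_FOLLOW_UP_BRANCH = "spawn_follow_up_branch"
--     SPAWN_COUNTEREVIDENCE_BRANCH = "spawn_counterevidence_branch"
--     BOUNDED_STOP = "bounded_stop"
--     REPORT = "report"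
--     STOP = "stop"
--
-- def _parse_decision(
--
--     content: str,
-- ) -> tuple[SupervisorAction, str, list[str]]:
--     action = SupervisorAction.DISPATCH
--     reasoning = ""
--     priority_topics: list[str] = []
--
--     for raw_line in content.strip().splitlines():
--         line = raw_line.strip()
--         if line.lower().startswith("action:"):
--             candidate = line.split(":", 1)[1].strip().lower()
--             try:
--                 action = SupervisorAction(candidate)
--             except ValueError:
--                 action = SupervisorAction.DISPATCH
--         elif line.lower().startswith("reasoning:"):
--             reasoning = line.split(":", 1)[1].strip()
--         elif line.lower().startswith("priority_topics:"):
--             topics_str = line.split(":", 1)[1].strip()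
--             priority_topics = [topic.strip() for topic in topics_str.split(",") if topic.strip()]
--
--     return action, reasoning or "继续执行当前 Deep Research 控制流", priority_topics
-- ===== SOURCE B (Python) =====
-- from enum import Enum
--
-- class SupervisorAction(str, Enum):
--     PLAN = "plan"
--     DISPATCH = "dispatch"
--     REPLAN = "replan"
--     RETRY_BRANCH = "retry_branch"
--     PATCH_BRANCH = "patch_branch"
--     SPAWN_FOLLOW_UP_BRANCH = "spawn_follow_up_branch"
--     SPAWN_COUNTEREVIDENCE_BRANCH = "spawn_counterevidence_branch"
--     BOUNDED_STOP = "bounded_stop"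
--     REPORT = "report"
--     STOP = "stop"
--
-- def _parse_decision(content: str):
--     # Phase 1: index every "key: value" line into a dict (last occurrence wins,
--     # like A's overwrites); Phase 2: pull the three fields out of the dict.
--     fields = {}
--     for raw_line in content.strip().splitlines():
--         parts = raw_line.strip().split(":", 1)
--         if len(parts) == 2:
--             fields[parts[0].lower()] = parts[1]
--
--     candidate = fields.get("action")
--     if candidate is None:
--         action = SupervisorAction.DISPATCH
--     else:
--         try:
--             action = SupervisorAction(candidate.strip().lower())
--         except ValueError:
--             action = SupervisorAction.DISPATCH
--
--     reasoning = fields.get("reasoning", "").strip()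
--     topics_str = fields.get("priority_topics", "").strip()
--     priority_topics = [t.strip() for t in topics_str.split(",") if t.strip()]
--     return action, reasoning or "继续执行当前 Deep Research 控制流", priority_topics
-- ===== Notes on version B (the rewrite author's own statement) =====
-- stated objective: alternative
-- what changed: B replaces A's per-line three-way branch updating three locals with a generic one-pass dict index of colon-separated lines (last occurrence wins) followed by a separate extraction phase for the three fields.
import Mathlib
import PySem

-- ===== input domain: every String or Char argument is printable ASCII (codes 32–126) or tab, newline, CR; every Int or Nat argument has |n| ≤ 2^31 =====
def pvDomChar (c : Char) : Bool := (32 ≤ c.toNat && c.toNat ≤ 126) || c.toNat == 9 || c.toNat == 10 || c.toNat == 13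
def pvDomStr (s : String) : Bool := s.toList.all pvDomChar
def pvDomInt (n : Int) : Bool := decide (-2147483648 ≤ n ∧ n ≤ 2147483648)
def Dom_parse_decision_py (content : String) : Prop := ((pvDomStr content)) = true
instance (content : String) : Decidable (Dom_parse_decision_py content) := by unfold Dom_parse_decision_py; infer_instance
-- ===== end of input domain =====

-- B re-implements A with a dict built in one pass over the lines and a separate
-- field-extraction phase, instead of A's three-way branch updating three locals per line.

-- the string values of the SupervisorAction enum (SupervisorAction(c) succeeds iff c is one of these)
def pvValidActions : List String :=
  ["plan", "dispatch", "replan", "retry_branch", "patch_branch", "spawn_follow_up_branch",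
   "spawn_counterevidence_branch", "bounded_stop", "report", "stop"]

def pvDefaultReasoning : String := "继续执行当前 Deep Research 控制流"

-- [t.strip() for t in s.split(",") if t.strip()] (split? is total here: sep "," is nonempty)  (identical comprehension in both Pythons)
def pvTopics (s : String) : List String :=
  (((PySem.Str.split? s ",").getD []).filter (fun t => PySem.Str.strip t ≠ "")).map PySem.Str.strip

-- SupervisorAction(c) with the try/except ValueError fallback (identical in both Pythons)
def pvActionOf (candidate : String) : String :=
  if pvValidActions.contains candidate then candidate else "dispatch"

-- ===== PORT A =====
-- one iteration of A's for-loop over (action, reasoning, priority_topics)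
def pvStepA (s : String × String × List String) (raw_line : String) : String × String × List String :=
  let line := PySem.Str.strip raw_line
  if PySem.Str.startswith (PySem.Str.lower line) "action:" then
    -- guard guarantees ':' ∈ line, so split(":",1) has two parts; other shapes are unreachable
    match PySem.Str.splitMax? line ":" 1 with
    | some [_, tail] => (pvActionOf (PySem.Str.lower (PySem.Str.strip tail)), s.2.1, s.2.2)
    | _ => s
  else if PySem.Str.startswith (PySem.Str.lower line) "reasoning:" then
    match PySem.Str.splitMax? line ":" 1 with
    | some [_, tail] => (s.1, PySem.Str.strip tail, s.2.2)
    | _ => s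
  else if PySem.Str.startswith (PySem.Str.lower line) "priority_topics:" then
    match PySem.Str.splitMax? line ":" 1 with
    | some [_, tail] => (s.1, s.2.1, pvTopics (PySem.Str.strip tail))
    | _ => s
  else s

def parse_decision_py (content : String) : String × String × List String :=
  let r := (PySem.Str.splitlines (PySem.Str.strip content)).foldl pvStepA ("dispatch", "", [])
  (r.1, if r.2.1 = "" then pvDefaultReasoning else r.2.1, r.2.2)

-- ===== PORT B =====
-- one iteration of B's dict-building loop: fields[parts[0].lower()] = parts[1] when the line splits in two
def pvStepB (d : PySem.Dict String String) (raw_line : String) : PySem.Dict String String :=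
  match PySem.Str.splitMax? (PySem.Str.strip raw_line) ":" 1 with
  | some [head, tail] => d.insert (PySem.Str.lower head) tail
  | _ => d

-- B's extraction phase, reading the three fields out of the finished dict
def pvExtract (fields : PySem.Dict String String) : String × String × List String :=
  let action :=
    match fields.get? "action" with
    | some v => pvActionOf (PySem.Str.lower (PySem.Str.strip v))
    | none => "dispatch"
  (action,
   PySem.Str.strip (fields.getD "reasoning" ""),
   pvTopics (PySem.Str.strip (fields.getD "priority_topics" "")))

def parse_decision_py_alt (content : String) : String × String × List String :=
  let fields := (PySem.Str.splitlines (PySem.Str.strip content)).foldl pvStepB PySem.Dict.empty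
  let r := pvExtract fields
  (r.1, if r.2.1 = "" then pvDefaultReasoning else r.2.1, r.2.2)

-- ===== PRECONDITION & SPEC =====
def Spec_parse_decision_py (content : String) (out : String × String × List String) : Prop := out = parse_decision_py_alt content
instance (content : String) (out : String × String × List String) : Decidable (Spec_parse_decision_py content out) := by unfold Spec_parse_decision_py; infer_instance

-- ===== CLAIM (what is proved, stated in full; the proofs are below) =====
def Claim_equal_parse_decision_py : Prop := ∀ (content : String), Dom_parse_decision_py content → Spec_parse_decision_py content (parse_decision_py content)

-- ===== LEMMAS AND PROOFS =====

theorem pvGo_zero (fuel : Nat) (l cur : List Char) (acc : List (List Char)) :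
    PySem.Chars.splitOnMax.go [':'] fuel 0 l cur acc = ((cur.reverse ++ l) :: acc).reverse := by
  cases fuel with
  | zero => rfl
  | succ n => cases l <;> simp [PySem.Chars.splitOnMax.go]

-- splitOnMax.go with maxsplit 1 splits at the first ':'

theorem pvGo_one (l : List Char) (fuel : Nat) (cur : List Char) (acc : List (List Char)) (h : l.length < fuel) :
    PySem.Chars.splitOnMax.go [':'] fuel 1 l cur acc =
      if ':' ∈ l then
        acc.reverse ++ [cur.reverse ++ l.takeWhile (fun c => c != ':'), (l.dropWhile (fun c => c != ':')).tail]
      else acc.reverse ++ [cur.reverse ++ l] := by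
  induction l generalizing fuel cur acc with
  | nil =>
    cases fuel with
    | zero => omega
    | succ n => simp [PySem.Chars.splitOnMax.go]
  | cons c rest ih =>
    cases fuel with
    | zero => omega
    | succ n =>
      by_cases hc : c = ':'
      · subst hc
        simp [PySem.Chars.splitOnMax.go, List.isPrefixOf, pvGo_zero]
      · have hne : (':' == c) = false := by simp [BEq.beq]; exact fun hx => hc (Eq.symm hx)
        have hpre : [':'].isPrefixOf (c :: rest) = false := by
          simp [List.isPrefixOf, hne]
        have hlen : rest.length < n := by simp at h; omega
        have hstep : PySem.Chars.splitOnMax.go [':'] (n + 1) 1 (c :: rest) cur acc =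
            PySem.Chars.splitOnMax.go [':'] n 1 rest (c :: cur) acc := by
          simp [PySem.Chars.splitOnMax.go, hpre]
        rw [hstep, ih n (c :: cur) acc hlen]
        have hb : (c != ':') = true := by simp [hc]
        by_cases hm : ':' ∈ rest <;>
          simp [hm, Ne.symm hc, hb]

theorem pvSplitOnMax_one (cs : List Char) :
    PySem.Chars.splitOnMax cs [':'] 1 =
      if ':' ∈ cs then [cs.takeWhile (fun c => c != ':'), (cs.dropWhile (fun c => c != ':')).tail]
      else [cs] := by
  unfold PySem.Chars.splitOnMax
  rw [if_neg (by omega)]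
  have := pvGo_one cs (cs.length + 1) [] [] (by omega)
  simpa using this

theorem pvLowerChar_colon (c : Char) : PySem.Chars.lowerChar c = ':' ↔ c = ':' := by
  unfold PySem.Chars.lowerChar
  by_cases h : PySem.Chars.isupper c = true
  · simp [h]
    have hA : (65:Nat) ≤ c.toNat ∧ c.toNat ≤ 90 := by
      simp [PySem.Chars.isupper, Char.le_def] at h
      exact ⟨h.1, h.2⟩
    constructor
    · intro hx
      exfalso
      have h2 : (Char.ofNat (c.toNat + 32)).toNat = (':').toNat := by rw [hx]
      rw [Char.toNat_ofNat] at h2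
      have hvalid : (c.toNat + 32).isValidChar := by unfold Nat.isValidChar; left; omega
      simp [hvalid] at h2
      omega
    · intro hx
      exfalso
      have : c.toNat = 58 := by rw [hx]; decide
      omega
  · simp [h]

theorem pvStartswith_iff (cs : List Char) (kw : List Char) (hkw : ':' ∉ kw) :
    (kw ++ [':']).isPrefixOf (PySem.Chars.lower cs) = true ↔
      ':' ∈ cs ∧ PySem.Chars.lower (cs.takeWhile (fun c => c != ':')) = kw := by
  induction cs generalizing kw with
  | nil => simp [PySem.Chars.lower]
  | cons c rest ih =>
    cases kw with
    | nil =>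
      by_cases hc : c = ':'
      · subst hc
        have hl : PySem.Chars.lowerChar ':' = ':' := by decide
        simp [PySem.Chars.lower, List.isPrefixOf, hl]
      · simp [PySem.Chars.lower, List.isPrefixOf, hc]
        intro h
        exact absurd ((pvLowerChar_colon c).mp (Eq.symm h)) hc
    | cons k kw' =>
      have hk : k ≠ ':' := fun h => hkw (h ▸ List.mem_cons_self)
      have hkw' : ':' ∉ kw' := fun h => hkw (List.mem_cons_of_mem _ h)
      by_cases hc : c = ':'
      · subst hc
        have hl : PySem.Chars.lowerChar ':' = ':' := by decide
        simp [PySem.Chars.lower, List.isPrefixOf, hl]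
        intro h
        exact (hk h).elim
      · have hb : (c != ':') = true := by simp [hc]
        simp only [PySem.Chars.lower, List.map_cons, List.cons_append, List.isPrefixOf, List.takeWhile_cons, hb, if_true]
        have hrec := ih kw' hkw'
        simp only [PySem.Chars.lower] at hrec ⊢
        rw [Bool.and_eq_true, beq_iff_eq, hrec]
        constructor
        · rintro ⟨h1, h2, h3⟩
          exact ⟨List.mem_cons_of_mem _ h2, by rw [h3, ← h1]⟩
        · rintro ⟨h1, h2⟩
          injection h2 with ha hb2
          refine ⟨ha.symm, ?_, hb2⟩
          rcases List.mem_cons.mp h1 with h | h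
          · exact (hc h.symm).elim
          · exact h

theorem pvSplitMaxStr (line : String) :
    PySem.Str.splitMax? line ":" 1 =
      some (if ':' ∈ line.toList
        then [String.ofList (line.toList.takeWhile (fun c => c != ':')),
              String.ofList ((line.toList.dropWhile (fun c => c != ':')).tail)]
        else [line]) := by
  simp [PySem.Str.splitMax?, PySem.Chars.splitMax?, pvSplitOnMax_one]
  split_ifs <;> simp

theorem pvStartsStr (line kw kwc : String) (h : kwc.toList = kw.toList ++ [':'])
    (hkw : ':' ∉ kw.toList) :
    PySem.Str.startswith (PySem.Str.lower line) kwc = true ↔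
      ':' ∈ line.toList ∧
        PySem.Str.lower (String.ofList (line.toList.takeWhile (fun c => c != ':'))) = kw := by
  have h1 : PySem.Str.startswith (PySem.Str.lower line) kwc =
      PySem.Chars.startswith (PySem.Chars.lower line.toList) kwc.toList := by simp
  rw [h1, h, PySem.Chars.startswith, pvStartswith_iff _ _ hkw]
  constructor
  · rintro ⟨h2, h3⟩
    refine ⟨h2, String.toList_inj.mp ?_⟩
    simpa using h3
  · rintro ⟨h2, h3⟩
    refine ⟨h2, ?_⟩
    have := congrArg String.toList h3
    simpa using this

theorem pvToListActions : ("action:" : String).toList = ("action" : String).toList ++ [':'] := by decide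

theorem pvToListReason : ("reasoning:" : String).toList = ("reasoning" : String).toList ++ [':'] := by decide

theorem pvToListTopics : ("priority_topics:" : String).toList = ("priority_topics" : String).toList ++ [':'] := by decide

set_option maxHeartbeats 2000000 in
theorem pvStep_comm (d : PySem.Dict String String) (raw : String) :
    pvStepA (pvExtract d) raw = pvExtract (pvStepB d raw) := by
  unfold pvStepA pvStepB
  set line := PySem.Str.strip raw with hline
  by_cases hcol : ':' ∈ line.toList
  · set key := PySem.Str.lower (String.ofList (line.toList.takeWhile (fun c => c != ':'))) with hkey
    have iffA := pvStartsStr line "action" "action:" pvToListActions (by decide)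
    have iffR := pvStartsStr line "reasoning" "reasoning:" pvToListReason (by decide)
    have iffT := pvStartsStr line "priority_topics" "priority_topics:" pvToListTopics (by decide)
    by_cases hk1 : key = "action"
    · have hA : PySem.Str.startswith (PySem.Str.lower line) "action:" = true := iffA.mpr ⟨hcol, hk1⟩
      simp only [hA, if_true]
      rw [pvSplitMaxStr line]
      simp only [hcol, if_true]
      unfold pvExtract
      rw [hkey] at hk1
      rw [hk1]
      rw [PySem.Dict.get?_insert_self,
          PySem.Dict.getD_insert_of_ne _ _ _ (show ("reasoning":String) ≠ "action" by decide),
          PySem.Dict.getD_insert_of_ne _ _ _ (show ("priority_topics":String) ≠ "action" by decide)]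
    · have hA : PySem.Str.startswith (PySem.Str.lower line) "action:" = false := by
        rw [Bool.eq_false_iff]; intro h; exact hk1 ((iffA.mp h).2)
      by_cases hk2 : key = "reasoning"
      · have hR : PySem.Str.startswith (PySem.Str.lower line) "reasoning:" = true := iffR.mpr ⟨hcol, hk2⟩
        simp only [hA, hR, if_true, Bool.false_eq_true, if_false]
        rw [pvSplitMaxStr line]
        simp only [hcol, if_true]
        unfold pvExtract
        rw [hkey] at hk2
        rw [hk2]
        rw [PySem.Dict.get?_insert_of_ne _ _ (show ("action":String) ≠ "reasoning" by decide),
            PySem.Dict.getD_insert_self,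
            PySem.Dict.getD_insert_of_ne _ _ _ (show ("priority_topics":String) ≠ "reasoning" by decide)]
      · have hR : PySem.Str.startswith (PySem.Str.lower line) "reasoning:" = false := by
          rw [Bool.eq_false_iff]; intro h; exact hk2 ((iffR.mp h).2)
        by_cases hk3 : key = "priority_topics"
        · have hT : PySem.Str.startswith (PySem.Str.lower line) "priority_topics:" = true := iffT.mpr ⟨hcol, hk3⟩
          simp only [hA, hR, hT, if_true, Bool.false_eq_true, if_false]
          rw [pvSplitMaxStr line]
          simp only [hcol, if_true]
          unfold pvExtract
          rw [hkey] at hk3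
          rw [hk3]
          rw [PySem.Dict.get?_insert_of_ne _ _ (show ("action":String) ≠ "priority_topics" by decide),
              PySem.Dict.getD_insert_of_ne _ _ _ (show ("reasoning":String) ≠ "priority_topics" by decide),
              PySem.Dict.getD_insert_self]
        · have hT : PySem.Str.startswith (PySem.Str.lower line) "priority_topics:" = false := by
            rw [Bool.eq_false_iff]; intro h; exact hk3 ((iffT.mp h).2)
          simp only [hA, hR, hT, Bool.false_eq_true, if_false]
          rw [pvSplitMaxStr line]
          simp only [hcol, if_true]
          unfold pvExtract
          rw [hkey] at hk1 hk2 hk3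
          rw [PySem.Dict.get?_insert_of_ne _ _ (fun h => hk1 (Eq.symm h)),
              PySem.Dict.getD_insert_of_ne _ _ _ (fun h => hk2 (Eq.symm h)),
              PySem.Dict.getD_insert_of_ne _ _ _ (fun h => hk3 (Eq.symm h))]
  · have iffA := pvStartsStr line "action" "action:" pvToListActions (by decide)
    have iffR := pvStartsStr line "reasoning" "reasoning:" pvToListReason (by decide)
    have iffT := pvStartsStr line "priority_topics" "priority_topics:" pvToListTopics (by decide)
    have hA : PySem.Str.startswith (PySem.Str.lower line) "action:" = false := by
      rw [Bool.eq_false_iff]; intro h; exact hcol ((iffA.mp h).1)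
    have hR : PySem.Str.startswith (PySem.Str.lower line) "reasoning:" = false := by
      rw [Bool.eq_false_iff]; intro h; exact hcol ((iffR.mp h).1)
    have hT : PySem.Str.startswith (PySem.Str.lower line) "priority_topics:" = false := by
      rw [Bool.eq_false_iff]; intro h; exact hcol ((iffT.mp h).1)
    simp only [hA, hR, hT, Bool.false_eq_true, if_false]
    rw [pvSplitMaxStr line]
    simp only [hcol, if_false]

theorem pvFold (lines : List String) (d : PySem.Dict String String) :
    lines.foldl pvStepA (pvExtract d) = pvExtract (lines.foldl pvStepB d) := by
  induction lines generalizing d with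
  | nil => rfl
  | cons l ls ih => rw [List.foldl_cons, List.foldl_cons, pvStep_comm, ih]

theorem pvExtract_empty : pvExtract PySem.Dict.empty = ("dispatch", "", ([] : List String)) := by
  decide

-- ===== VERDICT (by name: the statement is the Claim_ definition above) =====
theorem parse_decision_py_spec : Claim_equal_parse_decision_py := by
  intro content _
  unfold Spec_parse_decision_py parse_decision_py parse_decision_py_alt
  rw [← pvExtract_empty, pvFold]
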